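-- pv_equiv track=rewrite | github.com/sysfce2/mozilla_firefox | dom/media/webrtc/third_party_build/extract-for-git.py | filter_nonwebrtc
-- ===== SOURCE A (Python) =====
-- LIBWEBRTC_DIR = "third_party/libwebrtc"
--
-- def filter_nonwebrtc(commit):
--     filtered = []
--     skipping = False
--     for line in commit.split("\n"):
--         # Extract only patches affecting libwebrtc, but avoid commits that
--         # touch build, which is tracked by a separate repo, or that affect
--         # moz.build files which are code generated.
--         if (
--             line.startswith("diff --git a/" + LIBWEBRTC_DIR)
--             and not line.startswith("diff --git a/" + LIBWEBRTC_DIR + "/third_party/")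
--             and not line.startswith("diff --git a/" + LIBWEBRTC_DIR + "/README.moz")
--             and not line.startswith(
--                 "diff --git a/" + LIBWEBRTC_DIR + "/moz-patch-stack/"
--             )
--             and not line.endswith("moz.build")
--         ):
--             skipping = False
--         elif line.startswith("diff --git"):
--             skipping = True
--
--         if not skipping:
--             filtered.append(line)
--     return "\n".join(filtered)
-- ===== SOURCE B (Python) =====
-- LIBWEBRTC_DIR = "third_party/libwebrtc"
--
--
-- def _keep_header(line):
--     prefix = "diff --git a/" + LIBWEBRTC_DIR
--     return (
--         line.startswith(prefix)
--         and not line.startswith(prefix + "/third_party/")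
--         and not line.startswith(prefix + "/README.moz")
--         and not line.startswith(prefix + "/moz-patch-stack/")
--         and not line.endswith("moz.build")
--     )
--
--
-- def filter_nonwebrtc(commit):
--     # Block decomposition: the preamble (lines before the first "diff --git"
--     # header) is always kept; each header starts a block that is kept or
--     # dropped wholesale based on one test of its header line.
--     lines = commit.split("\n")
--     n = len(lines)
--     i = 0
--     while i < n and not lines[i].startswith("diff --git"):
--         i += 1
--     out = lines[:i]
--     while i < n:
--         j = i + 1
--         while j < n and not lines[j].startswith("diff --git"):
--             j += 1
--         if _keep_header(lines[i]):
--             out.extend(lines[i:j])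
--         i = j
--     return "\n".join(out)
-- ===== Notes on version B (the rewrite author's own statement) =====
-- stated objective: alternative
-- what changed: Replaces the per-line skipping flag carried through one scan with a block decomposition: the preamble before the first 'diff --git' header is kept as-is, then each header-delimited block is kept or dropped wholesale by one test of its header line.
import Mathlib
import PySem

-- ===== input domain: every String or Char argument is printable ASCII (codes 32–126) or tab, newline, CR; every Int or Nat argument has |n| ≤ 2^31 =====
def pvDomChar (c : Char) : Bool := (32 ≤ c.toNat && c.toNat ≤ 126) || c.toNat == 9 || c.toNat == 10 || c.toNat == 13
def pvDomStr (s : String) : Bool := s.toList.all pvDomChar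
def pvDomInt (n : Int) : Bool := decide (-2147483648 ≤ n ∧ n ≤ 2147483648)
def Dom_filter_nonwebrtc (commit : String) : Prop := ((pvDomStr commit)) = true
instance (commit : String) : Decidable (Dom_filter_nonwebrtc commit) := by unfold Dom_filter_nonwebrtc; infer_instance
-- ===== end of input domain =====

-- B replaces A's per-line skipping flag with a block decomposition (preamble + header-delimited blocks
-- filtered wholesale by their header line); same result, an alternative structure, not claimed faster.
-- String constants like "diff --git a/" + LIBWEBRTC_DIR are written constant-folded in both ports.

-- ===== PORT A =====
-- A: one scan over the lines carrying a 'skipping' flag, appending each line while the flag is false.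
def filter_nonwebrtc (commit : String) : String :=
  let step : (List String × Bool) → String → (List String × Bool) :=
    fun st line =>
      let skipping :=
        if PySem.Str.startswith line "diff --git a/third_party/libwebrtc"
            && !PySem.Str.startswith line "diff --git a/third_party/libwebrtc/third_party/"
            && !PySem.Str.startswith line "diff --git a/third_party/libwebrtc/README.moz"
            && !PySem.Str.startswith line "diff --git a/third_party/libwebrtc/moz-patch-stack/"
            && !PySem.Str.endswith line "moz.build" then
          false
        else if PySem.Str.startswith line "diff --git" then true
        else st.2
      (if !skipping then st.1 ++ [line] else st.1, skipping)
  -- sep "\n" is a non-empty literal, so split? is always `some`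
  let res := ((PySem.Str.split? commit "\n").getD []).foldl step ([], false)
  PySem.Str.join "\n" res.1

-- ===== PORT B =====
def pvIsDiff (line : String) : Bool := PySem.Str.startswith line "diff --git"

def pvKeepHeader (line : String) : Bool :=
  PySem.Str.startswith line "diff --git a/third_party/libwebrtc"
    && !PySem.Str.startswith line "diff --git a/third_party/libwebrtc/third_party/"
    && !PySem.Str.startswith line "diff --git a/third_party/libwebrtc/README.moz"
    && !PySem.Str.startswith line "diff --git a/third_party/libwebrtc/moz-patch-stack/"
    && !PySem.Str.endswith line "moz.build"

-- B's block loop: head is a block header; its body runs to the next header.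
def pvBlocks : List String → List String
  | [] => []
  | h :: t =>
    let body := t.takeWhile (fun l => !pvIsDiff l)
    let rest := t.dropWhile (fun l => !pvIsDiff l)
    (if pvKeepHeader h then h :: body else []) ++ pvBlocks rest
termination_by ls => ls.length
decreasing_by
  simp only [List.length_cons]
  exact Nat.lt_succ_of_le (List.length_dropWhile_le _ _)

def filter_nonwebrtc_alt (commit : String) : String :=
  let lines := (PySem.Str.split? commit "\n").getD []   -- sep "\n" non-empty: always `some`
  let pre := lines.takeWhile (fun l => !pvIsDiff l)     -- preamble, always kept
  let rest := lines.dropWhile (fun l => !pvIsDiff l)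
  PySem.Str.join "\n" (pre ++ pvBlocks rest)

-- ===== PRECONDITION & SPEC =====
def Spec_filter_nonwebrtc (commit : String) (out : String) : Prop := out = filter_nonwebrtc_alt commit
instance (commit : String) (out : String) : Decidable (Spec_filter_nonwebrtc commit out) := by unfold Spec_filter_nonwebrtc; infer_instance

-- ===== CLAIM (what is proved, stated in full; the proofs are below) =====
def Claim_equal_filter_nonwebrtc : Prop := ∀ (commit : String), Dom_filter_nonwebrtc commit → Spec_filter_nonwebrtc commit (filter_nonwebrtc commit)

-- ===== LEMMAS AND PROOFS =====

-- A's flag update, factored for the proof (pvKeepHeader is literally A's inline condition).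
def pvUpd (s : Bool) (l : String) : Bool :=
  if pvKeepHeader l then false else if pvIsDiff l then true else s

-- A's loop as plain structural recursion (no accumulator), for the induction.
def pvAGo : Bool → List String → List String
  | _, [] => []
  | s, l :: ls =>
    let s' := pvUpd s l
    (if s' then [] else [l]) ++ pvAGo s' ls

lemma pvKeep_isDiff {l : String} (h : pvKeepHeader l = true) : pvIsDiff l = true := by
  have h1 : PySem.Str.startswith l "diff --git a/third_party/libwebrtc" = true := by
    simp only [pvKeepHeader, Bool.and_eq_true] at h
    exact h.1.1.1.1
  simp only [pvIsDiff, PySem.Str.startswith_eq, PySem.Chars.startswith_iff] at h1 ⊢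
  exact List.IsPrefix.trans (by decide) h1

lemma pvUpd_nondiff {l : String} (s : Bool) (h : pvIsDiff l = false) : pvUpd s l = s := by
  have hk : pvKeepHeader l = false := by
    cases hkh : pvKeepHeader l
    · rfl
    · rw [pvKeep_isDiff hkh] at h; cases h
  simp [pvUpd, hk, h]

lemma pvAGo_false_nondiff (pre rest : List String)
    (h : ∀ l ∈ pre, pvIsDiff l = false) :
    pvAGo false (pre ++ rest) = pre ++ pvAGo false rest := by
  induction pre with
  | nil => rfl
  | cons p ps ih =>
    have hp : pvIsDiff p = false := h p (List.mem_cons_self ..)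
    simp only [List.cons_append, pvAGo, pvUpd_nondiff false hp]
    simp [ih fun l hl => h l (List.mem_cons_of_mem _ hl)]

lemma pvAGo_true_nondiff (pre rest : List String)
    (h : ∀ l ∈ pre, pvIsDiff l = false) :
    pvAGo true (pre ++ rest) = pvAGo true rest := by
  induction pre with
  | nil => rfl
  | cons p ps ih =>
    have hp : pvIsDiff p = false := h p (List.mem_cons_self ..)
    simp only [List.cons_append, pvAGo, pvUpd_nondiff true hp]
    simp [ih fun l hl => h l (List.mem_cons_of_mem _ hl)]

lemma pvHead?_dropWhile {p : String → Bool} {t : List String} {l : String}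
    (h : (t.dropWhile p).head? = some l) : p l = false := by
  have hne : t.dropWhile p ≠ [] := by intro e; rw [e] at h; cases h
  have hnot := List.head_dropWhile_not p hne
  have hh : (t.dropWhile p).head hne = l := by
    have h2 := List.head?_eq_some_head (l := t.dropWhile p) hne
    rw [h2] at h
    exact Option.some.inj h
  rw [hh] at hnot
  simpa using hnot

-- Core: on a list whose head (if any) is a header line, A's flagged scan equals B's block loop,
-- whatever the incoming flag.
lemma pvAGo_eq_blocks : ∀ (n : ℕ) (rest : List String), rest.length ≤ n →
    (∀ l, rest.head? = some l → pvIsDiff l = true) →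
    ∀ s, pvAGo s rest = pvBlocks rest := by
  intro n
  induction n with
  | zero =>
    intro rest hlen _ s
    have : rest = [] := List.eq_nil_of_length_eq_zero (Nat.le_zero.mp hlen)
    subst this
    simp [pvAGo, pvBlocks]
  | succ n ih =>
    intro rest hlen hhead s
    match rest with
    | [] => simp [pvAGo, pvBlocks]
    | h :: t =>
      have hd : pvIsDiff h = true := hhead h rfl
      have hbody : ∀ l ∈ t.takeWhile (fun l => !pvIsDiff l), pvIsDiff l = false := by
        intro l hl
        have := List.mem_takeWhile_imp hl
        simpa using this
      have hsplit : t.takeWhile (fun l => !pvIsDiff l) ++ t.dropWhile (fun l => !pvIsDiff l) = t :=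
        List.takeWhile_append_dropWhile
      have hresthead : ∀ l, (t.dropWhile (fun l => !pvIsDiff l)).head? = some l → pvIsDiff l = true := by
        intro l hl
        have := pvHead?_dropWhile hl
        simpa using this
      have hrestlen : (t.dropWhile (fun l => !pvIsDiff l)).length ≤ n := by
        have h1 := List.length_dropWhile_le (p := fun l => !pvIsDiff l) (l := t)
        simp only [List.length_cons] at hlen
        omega
      rw [pvBlocks]
      cases hk : pvKeepHeader h with
      | false =>
        have hupd : pvUpd s h = true := by simp [pvUpd, hk, hd]
        simp only [pvAGo, hupd, if_true, List.nil_append]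
        conv_lhs => rw [← hsplit]
        rw [pvAGo_true_nondiff _ _ hbody, ih _ hrestlen hresthead]
        simp
      | true =>
        have hupd : pvUpd s h = false := by simp [pvUpd, hk]
        simp only [pvAGo, hupd, if_false, Bool.false_eq_true, List.singleton_append]
        conv_lhs => rw [← hsplit]
        rw [pvAGo_false_nondiff _ _ hbody, ih _ hrestlen hresthead]
        simp

-- A's foldl with its (accumulator, flag) state computes acc ++ pvAGo.
lemma pvFoldl_eq_aGo (step : (List String × Bool) → String → (List String × Bool))
    (hstep : ∀ acc s l, step (acc, s) l =
      (if pvUpd s l then acc else acc ++ [l], pvUpd s l)) :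
    ∀ (ls : List String) (acc : List String) (s : Bool),
      (ls.foldl step (acc, s)).1 = acc ++ pvAGo s ls := by
  intro ls
  induction ls with
  | nil => simp [pvAGo]
  | cons l ls ih =>
    intro acc s
    simp only [List.foldl_cons, hstep]
    rw [ih]
    cases hu : pvUpd s l <;> simp [pvAGo, hu]

-- ===== VERDICT (by name: the statement is the Claim_ definition above) =====
theorem filter_nonwebrtc_spec : Claim_equal_filter_nonwebrtc := by
  intro commit _
  show _ = _
  unfold filter_nonwebrtc filter_nonwebrtc_alt
  simp only []
  set lines := (PySem.Str.split? commit "\n").getD [] with hlines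
  congr 1
  have hstep : ∀ (acc : List String) (s : Bool) (l : String),
      (fun (st : List String × Bool) line =>
        let skipping :=
          if PySem.Str.startswith line "diff --git a/third_party/libwebrtc"
              && !PySem.Str.startswith line "diff --git a/third_party/libwebrtc/third_party/"
              && !PySem.Str.startswith line "diff --git a/third_party/libwebrtc/README.moz"
              && !PySem.Str.startswith line "diff --git a/third_party/libwebrtc/moz-patch-stack/"
              && !PySem.Str.endswith line "moz.build" then
            false
          else if PySem.Str.startswith line "diff --git" then true
          else st.2
        (if !skipping then st.1 ++ [line] else st.1, skipping)) (acc, s) l =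
      (if pvUpd s l then acc else acc ++ [l], pvUpd s l) := by
    intro acc s l
    simp only [pvUpd, pvKeepHeader, pvIsDiff]
    cases hu : (if PySem.Str.startswith l "diff --git a/third_party/libwebrtc"
              && !PySem.Str.startswith l "diff --git a/third_party/libwebrtc/third_party/"
              && !PySem.Str.startswith l "diff --git a/third_party/libwebrtc/README.moz"
              && !PySem.Str.startswith l "diff --git a/third_party/libwebrtc/moz-patch-stack/"
              && !PySem.Str.endswith l "moz.build" then
            false
          else if PySem.Str.startswith l "diff --git" then true
          else s) <;> simp_all
  rw [pvFoldl_eq_aGo _ (fun acc s l => hstep acc s l) lines [] false, List.nil_append]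
  conv_lhs => rw [← List.takeWhile_append_dropWhile (p := fun l => !pvIsDiff l) (l := lines)]
  rw [pvAGo_false_nondiff]
  · congr 1
    apply pvAGo_eq_blocks (lines.dropWhile (fun l => !pvIsDiff l)).length _ le_rfl
    intro l hl
    have := pvHead?_dropWhile hl
    simpa using this
  · intro l hl
    have := List.mem_takeWhile_imp hl
    simpa using this
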